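-- pv_equiv track=rewrite | github.com/Lotrhic/Automatas | Brians Brain.py | nuevaGeneracion
-- ===== SOURCE A (Python) =====
-- from copy import deepcopy
--
-- def vecinos(M, fila, col):
--     v = []
--     filas=len(M)
--     cols=len(M[0])
--
--     for f in range(fila - 1, fila + 2):
--         for c in range(col - 1, col + 2):
--             if f != fila or c != col:
--                 v.append(M[f%filas][c%cols])
--     return v
--
-- def nuevoEstado(M, fila, col):
--     if M[fila][col]==0:
--         v=vecinos(M,fila,col)
--         if v.count(2)==2:
--             return 2
--         else:
--             return 0
--     if M[fila][col]==2:
--         return 1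
--     if M[fila][col]==1:
--         return 0
--
-- def nuevaGeneracion(M):
--     M2=deepcopy(M)
--     filas=len(M)
--     cols=len(M[0])
--     for f in range(filas):
--         for c in range(cols):
--             M2[f][c]=nuevoEstado(M,f,c)
--     del M
--     return M2
-- ===== SOURCE B (Python) =====
-- def nuevaGeneracion(M):
--     filas = len(M)
--     cols = len(M[0])
--     # scatter pass: every firing cell (state 2) adds one hit at each of its
--     # 8 wrapped neighbour positions
--     hits = []
--     for i in range(filas):
--         for j in range(cols):
--             if M[i][j] == 2:
--                 for df in (-1, 0, 1):
--                     for dc in (-1, 0, 1):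
--                         if df != 0 or dc != 0:
--                             hits.append(((i + df) % filas, (j + dc) % cols))
--     counts = {}
--     for p in hits:
--         counts[p] = counts.get(p, 0) + 1
--     # rule pass: 2 -> 1, 1 -> 0, 0 -> 2 iff exactly two firing neighbours
--     res = [row[:] for row in M]
--     for f in range(filas):
--         for c in range(cols):
--             x = M[f][c]
--             if x == 2:
--                 res[f][c] = 1
--             elif x == 1:
--                 res[f][c] = 0
--             elif x == 0:
--                 res[f][c] = 2 if counts.get((f, c), 0) == 2 else 0
--             else:
--                 raise ValueError("invalid cell state: %r" % (x,))
--     return res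
-- ===== Notes on version B (the rewrite author's own statement) =====
-- stated objective: alternative
-- what changed: Instead of gathering and counting the 8 wrapped neighbours per cell (A's vecinos list per cell), B does a scatter pass: each firing cell (state 2) increments a hit-counter dict at its 8 wrapped neighbour positions, and a second pass applies the rule 2->1, 1->0, 0->2 iff the hit count is exactly 2 (and rejects cell states outside {0,1,2} with ValueError where A silently emits None).
-- outside the precondition, e.g. on nuevaGeneracion([[5]]): A returns [[None]], B raises ValueError
import Mathlib
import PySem

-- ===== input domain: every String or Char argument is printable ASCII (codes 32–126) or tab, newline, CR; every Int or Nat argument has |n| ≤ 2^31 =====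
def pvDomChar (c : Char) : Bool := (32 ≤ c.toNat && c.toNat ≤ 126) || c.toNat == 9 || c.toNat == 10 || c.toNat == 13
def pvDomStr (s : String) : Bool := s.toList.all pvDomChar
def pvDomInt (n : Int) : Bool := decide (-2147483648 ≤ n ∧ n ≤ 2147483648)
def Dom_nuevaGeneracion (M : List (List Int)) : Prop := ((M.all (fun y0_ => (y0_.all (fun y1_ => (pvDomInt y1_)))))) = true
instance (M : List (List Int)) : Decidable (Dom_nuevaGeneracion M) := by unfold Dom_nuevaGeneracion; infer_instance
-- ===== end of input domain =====

-- B replaces A's per-cell gather-and-count of the 8 wrapped neighbours by a scatter pass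
-- (each firing cell records a hit at its 8 neighbour positions, tallied in a dict) plus a
-- rule pass; a different algorithm of the same cost (no speed claim).

-- ===== PORT A =====
-- M[i][j]; under Pre_ every index used is in range, so the defaults are never taken.
def cellAt (M : List (List Int)) (i j : Int) : Int :=
  PySem.List.pyGetD (PySem.List.pyGetD M i []) j 0

def vecinos (M : List (List Int)) (fila col : Int) : List Int :=
  let filas : Int := M.length
  -- len(M[0]); Python raises IndexError on empty M, excluded by Pre_
  let cols : Int := (M.headD []).length
  (PySem.List.pyRange (fila - 1) (fila + 2) 1).foldl (fun v f =>
    (PySem.List.pyRange (col - 1) (col + 2) 1).foldl (fun v c =>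
      if f ≠ fila ∨ c ≠ col then
        v ++ [cellAt M (PySem.Int.mod f filas) (PySem.Int.mod c cols)]
      else v) v) []

def nuevoEstado (M : List (List Int)) (fila col : Int) : Int :=
  if cellAt M fila col = 0 then
    (if (vecinos M fila col).count 2 = 2 then 2 else 0)
  else if cellAt M fila col = 2 then 1
  else if cellAt M fila col = 1 then 0
  else 0  -- Python returns None here (cell value outside {0,1,2}); excluded by Pre_

def nuevaGeneracion (M : List (List Int)) : List (List Int) :=
  let filas := M.length
  let cols := (M.headD []).length   -- len(M[0]); empty M excluded by Pre_
  (List.range filas).foldl (fun M2 f =>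
    (List.range cols).foldl (fun M2 c =>
      M2.set f ((M2.getD f []).set c (nuevoEstado M (f : Int) (c : Int)))) M2) M

-- ===== PORT B =====
def offs : List (Int × Int) := [(-1,-1),(-1,0),(-1,1),(0,-1),(0,1),(1,-1),(1,0),(1,1)]

-- scatter pass: hit positions of every firing cell
def bHits (M : List (List Int)) : List (Int × Int) :=
  let filas : Int := M.length
  let cols : Int := (M.headD []).length
  (PySem.List.pyRange 0 filas 1).foldl (fun hits i =>
    (PySem.List.pyRange 0 cols 1).foldl (fun hits j =>
      if cellAt M i j = 2 then
        offs.foldl (fun hits d =>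
          hits ++ [(PySem.Int.mod (i + d.1) filas, PySem.Int.mod (j + d.2) cols)]) hits
      else hits) hits) []

def bCell (M : List (List Int)) (counts : PySem.Dict (Int × Int) Int) (f c : Int) : Int :=
  if cellAt M f c = 2 then 1
  else if cellAt M f c = 1 then 0
  else if cellAt M f c = 0 then (if counts.getD (f, c) 0 = 2 then 2 else 0)
  else 0  -- Python raises ValueError here (cell state outside {0,1,2}); excluded by Pre_

def nuevaGeneracion_alt (M : List (List Int)) : List (List Int) :=
  let filas := M.length
  let cols := (M.headD []).length
  let counts : PySem.Dict (Int × Int) Int :=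
    (bHits M).foldl (fun d p => d.insert p (d.getD p 0 + 1)) PySem.Dict.empty
  -- res = [row[:] for row in M], then res[f][c] is overwritten cell by cell
  (List.range filas).foldl (fun res f =>
    (List.range cols).foldl (fun res c =>
      res.set f ((res.getD f []).set c (bCell M counts (f : Int) (c : Int)))) res) M

-- ===== PRECONDITION & SPEC =====
-- Pre_ is the set of inputs where A returns a grid of ints: M nonempty, every row at
-- least as long as row 0 (a shorter row makes A raise IndexError), and every cell A
-- reads — the first len(M[0]) cells of each row — in {0,1,2} (otherwise A writes None,
-- not an int, into the result).
def Pre_nuevaGeneracion (M : List (List Int)) : Prop :=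
  M ≠ [] ∧ (∀ row ∈ M, (M.headD []).length ≤ row.length) ∧
  (∀ row ∈ M, ∀ x ∈ row.take (M.headD []).length, x = 0 ∨ x = 1 ∨ x = 2)
instance (M : List (List Int)) : Decidable (Pre_nuevaGeneracion M) := by
  unfold Pre_nuevaGeneracion; infer_instance

def pvWitness_nuevaGeneracion : List (List Int) := [[2,0,0],[0,0,0],[0,1,0]]

def Spec_nuevaGeneracion (M : List (List Int)) (out : List (List Int)) : Prop := out = nuevaGeneracion_alt M
instance (M : List (List Int)) (out : List (List Int)) : Decidable (Spec_nuevaGeneracion M out) := by unfold Spec_nuevaGeneracion; infer_instance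

-- ===== CLAIM (what is proved, stated in full; the proofs are below) =====
def Claim_equal_nuevaGeneracion : Prop := ∀ (M : List (List Int)), Dom_nuevaGeneracion M → Pre_nuevaGeneracion M → Spec_nuevaGeneracion M (nuevaGeneracion M)

-- ===== LEMMAS AND PROOFS =====

lemma pv_sum_range (n : Nat) (g : Nat → Nat) :
    ((List.range n).map g).sum = ∑ i ∈ Finset.range n, g i := by
  induction n with
  | zero => simp
  | succ n ih => simp [List.range_succ, Finset.sum_range_succ, ih]

lemma pv_count_flatMap {α β : Type} [BEq β] (l : List α) (g : α → List β) (a : β) :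
    ((l.flatMap g).count a) = ((l.map (fun x => (g x).count a)).sum) := by
  induction l with
  | nil => simp
  | cons h t ih => simp [List.count_append, ih]

-- one row of A's in-place update loop: setting every column in turn is mapping
lemma pv_rowFold (g : Nat → Int) (n : Nat) (r0 : List Int) (h : n ≤ r0.length) :
    (List.range n).foldl (fun r c => r.set c (g c)) r0
      = (List.range n).map g ++ r0.drop n := by
  induction n with
  | zero => simp
  | succ n ih =>
    rw [List.range_succ, List.foldl_append, ih (by omega)]
    simp only [List.foldl_cons, List.foldl_nil, List.map_append, List.map_cons, List.map_nil]
    rw [List.set_append]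
    simp only [List.length_map, List.length_range, lt_irrefl, Nat.sub_self, if_false]
    rw [List.drop_eq_getElem_cons (show n < r0.length by omega), List.set_cons_zero]
    simp

-- A's inner column loop touches only row f of the accumulator
lemma pv_innerFold (g : Nat → Int) (n : Nat) (A : List (List Int)) (f : Nat)
    (hf : f < A.length) :
    (List.range n).foldl (fun A2 c => A2.set f ((A2.getD f []).set c (g c))) A
      = A.set f ((List.range n).foldl (fun r c => r.set c (g c)) (A.getD f [])) := by
  induction n with
  | zero =>
    simp only [List.range_zero, List.foldl_nil, List.getD_eq_getElem?_getD]
    rw [List.getElem?_eq_getElem hf]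
    simp [List.set_getElem_self]
  | succ n ih =>
    rw [List.range_succ, List.foldl_append, List.foldl_append, ih]
    simp only [List.foldl_cons, List.foldl_nil, List.getD_eq_getElem?_getD,
      List.getElem?_set_self (show f < A.length by exact hf), Option.getD_some, List.set_set]

-- invariant of the shared copy-then-overwrite row loop (both ports use this loop shape,
-- with different cell functions g); rows may be longer than row 0: the tail is kept
lemma pv_outer (M : List (List Int)) (g : Nat → Nat → Int)
    (hge : ∀ row ∈ M, (M.headD []).length ≤ row.length)
    (m : Nat) (hm : m ≤ M.length) :
    (List.range m).foldl (fun M2 f =>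
      (List.range (M.headD []).length).foldl (fun M2 c =>
        M2.set f ((M2.getD f []).set c (g f c))) M2) M
    = (List.range m).map (fun (f : Nat) =>
        (List.range (M.headD []).length).map (fun (c : Nat) => g f c)
          ++ (M.getD f []).drop (M.headD []).length)
      ++ M.drop m := by
  induction m with
  | zero => simp
  | succ m ih =>
    have hm' : m ≤ M.length := by omega
    rw [List.range_succ, List.foldl_append, ih hm']
    simp only [List.foldl_cons, List.foldl_nil]
    set pref := (List.range m).map (fun (f : Nat) =>
        (List.range (M.headD []).length).map (fun (c : Nat) => g f c)
          ++ (M.getD f []).drop (M.headD []).length) with hpref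
    have hlenpref : pref.length = m := by simp [hpref]
    have hlen : (pref ++ M.drop m).length = M.length := by
      simp [hlenpref]; omega
    have hmlt : m < (pref ++ M.drop m).length := by omega
    rw [pv_innerFold _ _ _ _ hmlt]
    have hget : (pref ++ M.drop m).getD m [] = M[m]'(by omega) := by
      rw [List.getD_eq_getElem?_getD, List.getElem?_append_right (by omega),
        hlenpref, Nat.sub_self, List.drop_eq_getElem_cons (by omega)]
      simp [List.getElem?_eq_getElem (show m < M.length by omega)]
    rw [hget, pv_rowFold _ _ _ (hge (M[m]'(by omega)) (List.getElem_mem _))]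
    rw [List.set_append]
    simp only [hlenpref, lt_irrefl, Nat.sub_self, if_false]
    rw [List.drop_eq_getElem_cons (show m < M.length by omega), List.set_cons_zero]
    have hgetD : M.getD m [] = M[m]'(by omega) := by
      rw [List.getD_eq_getElem?_getD, List.getElem?_eq_getElem (show m < M.length by omega)]; rfl
    simp [hpref, List.getD_eq_getElem?_getD, List.getElem?_eq_getElem (show m < M.length by omega)]

lemma pv_A_norm (M : List (List Int))
    (hge : ∀ row ∈ M, (M.headD []).length ≤ row.length) :
    nuevaGeneracion M
      = (List.range M.length).map (fun (f : Nat) =>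
          (List.range (M.headD []).length).map (fun (c : Nat) => nuevoEstado M (f : Int) (c : Int))
            ++ (M.getD f []).drop (M.headD []).length) := by
  unfold nuevaGeneracion
  rw [pv_outer M (fun (f c : Nat) => nuevoEstado M (f : Int) (c : Int)) hge M.length (le_refl _)]
  simp

lemma pv_ifAppend {α : Type} (P : Prop) [Decidable P] (acc l : List α) :
    (if P then acc ++ l else acc) = acc ++ (if P then l else []) := by
  split <;> simp

lemma pv_bHits_eq (M : List (List Int)) :
    bHits M = (PySem.List.pyRange 0 (M.length : Int) 1).flatMap (fun i =>
      (PySem.List.pyRange 0 ((M.headD []).length : Int) 1).flatMap (fun j =>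
        if cellAt M i j = 2 then
          offs.map (fun d => (PySem.Int.mod (i + d.1) (M.length : Int),
                              PySem.Int.mod (j + d.2) ((M.headD []).length : Int)))
        else [])) := by
  unfold bHits
  simp only [PySem.List.foldl_append_singleton_eq_map, pv_ifAppend,
    PySem.List.foldl_append_eq_flatMap, List.nil_append]

lemma pv_alt_norm (M : List (List Int))
    (hge : ∀ row ∈ M, (M.headD []).length ≤ row.length) :
    nuevaGeneracion_alt M
      = (List.range M.length).map (fun (f : Nat) =>
          (List.range (M.headD []).length).map (fun (c : Nat) =>
            bCell M (PySem.Dict.counter (bHits M)) (f : Int) (c : Int))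
            ++ (M.getD f []).drop (M.headD []).length) := by
  unfold nuevaGeneracion_alt
  simp only [PySem.Dict.foldl_insert_getD_add_one_eq_counter]
  rw [pv_outer M (fun (f c : Nat) =>
    bCell M (PySem.Dict.counter (bHits M)) (f : Int) (c : Int)) hge M.length (le_refl _)]
  simp

-- over one wrapped row/column period, exactly one index hits a given residue
lemma pv_K (n : Nat) (hn : 0 < n) (y d : Int) (hy0 : 0 ≤ y) (hy : y < n) (g : Nat → Nat) :
    (∑ i ∈ Finset.range n, if PySem.Int.mod ((i : Int) + d) (n : Int) = y then g i else 0)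
      = g ((PySem.Int.mod (y - d) (n : Int)).toNat) := by
  have hpos : (0 : Int) < (n : Int) := by exact_mod_cast hn
  have hmod_add : ∀ a b : Int, (a % (n : Int) + b) % (n : Int) = (a + b) % (n : Int) := by
    intro a b
    rw [Int.add_emod, Int.emod_emod_of_dvd a dvd_rfl, ← Int.add_emod]
  have h2 := PySem.Int.mod_eq_emod_of_pos (a := y - d) hpos
  have hmn := PySem.Int.mod_nonneg (y - d) hpos
  have hml := PySem.Int.mod_lt (y - d) hpos
  set i0 : Nat := (PySem.Int.mod (y - d) (n : Int)).toNat with hi0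
  have hi0lt : i0 < n := by omega
  have hi0cast : (i0 : Int) = (y - d) % (n : Int) := by rw [hi0, h2]; omega
  have hcond : ∀ i ∈ Finset.range n,
      (if PySem.Int.mod ((i : Int) + d) (n : Int) = y then g i else 0)
        = (if i = i0 then g i else 0) := by
    intro i hi
    rw [Finset.mem_range] at hi
    have hin : (i : Int) < (n : Int) := by exact_mod_cast hi
    have hin0 : (0 : Int) ≤ (i : Int) := by positivity
    have h1 := PySem.Int.mod_eq_emod_of_pos (a := (i : Int) + d) hpos
    have : (PySem.Int.mod ((i : Int) + d) (n : Int) = y) ↔ (i = i0) := by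
      rw [h1]
      constructor
      · intro h
        have : (y - d) % (n : Int) = (i : Int) := by
          rw [← h, sub_eq_add_neg, hmod_add, add_neg_cancel_right, Int.emod_eq_of_lt hin0 hin]
        omega
      · intro h
        subst h
        rw [hi0cast, sub_eq_add_neg, hmod_add]
        have : y + -d + d = y := by ring
        rw [this, Int.emod_eq_of_lt hy0 hy]
    simp only [this]
  rw [Finset.sum_congr rfl hcond, Finset.sum_ite_eq' (Finset.range n) i0 g]
  simp [hi0lt]

-- the scatter contribution of one offset, summed over all cells, is the gathered read
lemma pv_scatter_one (M : List (List Int)) (F C f c : Nat) (d1 d2 : Int)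
    (hF : 0 < F) (hC : 0 < C) (hf : f < F) (hc : c < C) :
    (∑ i ∈ Finset.range F, ∑ j ∈ Finset.range C,
      (if cellAt M (i : Int) (j : Int) = 2 then
        (if PySem.Int.mod ((i : Int) + d1) (F : Int) = (f : Int) ∧
            PySem.Int.mod ((j : Int) + d2) (C : Int) = (c : Int) then 1 else 0)
       else 0))
      = (if cellAt M (PySem.Int.mod ((f : Int) - d1) (F : Int))
                     (PySem.Int.mod ((c : Int) - d2) (C : Int)) = 2 then 1 else 0) := by
  have step1 : ∀ i j : Nat,
      (if cellAt M (i : Int) (j : Int) = 2 then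
        (if PySem.Int.mod ((i : Int) + d1) (F : Int) = (f : Int) ∧
            PySem.Int.mod ((j : Int) + d2) (C : Int) = (c : Int) then 1 else 0)
       else 0)
      = (if PySem.Int.mod ((i : Int) + d1) (F : Int) = (f : Int) then
          (if PySem.Int.mod ((j : Int) + d2) (C : Int) = (c : Int) then
            (if cellAt M (i : Int) (j : Int) = 2 then 1 else 0) else 0) else 0) := by
    intro i j
    split_ifs <;> simp_all
  have step2 : ∀ i : Nat,
      (∑ j ∈ Finset.range C,
        (if PySem.Int.mod ((i : Int) + d1) (F : Int) = (f : Int) then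
          (if PySem.Int.mod ((j : Int) + d2) (C : Int) = (c : Int) then
            (if cellAt M (i : Int) (j : Int) = 2 then 1 else 0) else 0) else 0))
      = (if PySem.Int.mod ((i : Int) + d1) (F : Int) = (f : Int) then
          (∑ j ∈ Finset.range C,
            (if PySem.Int.mod ((j : Int) + d2) (C : Int) = (c : Int) then
              (if cellAt M (i : Int) (j : Int) = 2 then 1 else 0) else 0)) else 0) := by
    intro i
    split <;> simp
  simp only [step1, step2]
  rw [pv_K F hF (f : Int) d1 (by positivity) (by exact_mod_cast hf)]
  rw [pv_K C hC (c : Int) d2 (by positivity) (by exact_mod_cast hc)]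
  have e1 : ((((PySem.Int.mod ((f : Int) - d1) (F : Int)).toNat) : Nat) : Int)
      = PySem.Int.mod ((f : Int) - d1) (F : Int) := by
    have := PySem.Int.mod_nonneg ((f : Int) - d1) (show (0:Int) < (F : Int) by exact_mod_cast hF)
    omega
  have e2 : ((((PySem.Int.mod ((c : Int) - d2) (C : Int)).toNat) : Nat) : Int)
      = PySem.Int.mod ((c : Int) - d2) (C : Int) := by
    have := PySem.Int.mod_nonneg ((c : Int) - d2) (show (0:Int) < (C : Int) by exact_mod_cast hC)
    omega
  rw [e1, e2]

lemma pv_range3 (a : Int) : PySem.List.pyRange (a - 1) (a + 2) 1 = [a - 1, a, a + 1] := by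
  rw [PySem.List.pyRange_one_cons (by omega), PySem.List.pyRange_one_cons (by omega),
    PySem.List.pyRange_one_cons (by omega), PySem.List.pyRange_one_eq_nil (by omega)]
  norm_num

lemma pv_vecinos_explicit (M : List (List Int)) (fila col : Int) :
    vecinos M fila col
      = offs.map (fun d => cellAt M (PySem.Int.mod (fila + d.1) (M.length : Int))
                                    (PySem.Int.mod (col + d.2) ((M.headD []).length : Int))) := by
  unfold vecinos
  rw [pv_range3, pv_range3]
  have h1 : fila - 1 ≠ fila := by omega
  have h2 : fila + 1 ≠ fila := by omega
  have h3 : col - 1 ≠ col := by omega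
  have h4 : col + 1 ≠ col := by omega
  simp only [List.foldl_cons, List.foldl_nil, h1, h2, h3, h4, ne_eq, not_true_eq_false,
    not_false_eq_true, or_true, true_or, or_self, if_true, if_false,
    List.nil_append, List.append_assoc, List.cons_append, offs, List.map_cons, List.map_nil]
  simp [sub_eq_add_neg]

lemma pv_ite_split (P : Prop) [Decidable P] (a b : Nat) :
    (if P then a + b else 0) = (if P then a else 0) + (if P then b else 0) := by
  split <;> simp

-- the hit count scattered at (f, c) equals A's gathered neighbour count
lemma pv_count_eq (M : List (List Int)) (f c : Nat)
    (hf : f < M.length) (hc : c < (M.headD []).length) :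
    (bHits M).count ((f : Int), (c : Int)) = (vecinos M (f : Int) (c : Int)).count 2 := by
  have hF : 0 < M.length := by omega
  have hC : 0 < (M.headD []).length := by omega
  rw [pv_bHits_eq, pv_count_flatMap]
  simp only [pv_count_flatMap, PySem.List.pyRange_zero_natCast, List.map_map]
  rw [pv_sum_range]
  simp only [Function.comp, pv_sum_range, apply_ite (List.count ((f : Int), (c : Int))),
    List.count_nil, offs, List.map_cons, List.map_nil, List.count_cons, beq_iff_eq, Prod.mk.injEq,
    zero_add, pv_ite_split, Finset.sum_add_distrib]
  rw [pv_scatter_one M _ _ f c (-1) (-1) hF hC hf hc,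
      pv_scatter_one M _ _ f c (-1) 0 hF hC hf hc,
      pv_scatter_one M _ _ f c (-1) 1 hF hC hf hc,
      pv_scatter_one M _ _ f c 0 (-1) hF hC hf hc,
      pv_scatter_one M _ _ f c 0 1 hF hC hf hc,
      pv_scatter_one M _ _ f c 1 (-1) hF hC hf hc,
      pv_scatter_one M _ _ f c 1 0 hF hC hf hc,
      pv_scatter_one M _ _ f c 1 1 hF hC hf hc]
  rw [pv_vecinos_explicit]
  simp only [offs, List.map_cons, List.map_nil, List.count_cons, List.count_nil,
    beq_iff_eq, zero_add]
  ring_nf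

lemma pv_cellAt_getElem (M : List (List Int)) (f c : Nat)
    (hf : f < M.length) (hc : c < (M[f]'hf).length) :
    cellAt M (f : Int) (c : Int) = (M[f]'hf)[c]'hc := by
  unfold cellAt
  rw [PySem.List.pyGetD_natCast, PySem.List.pyGetD_natCast]
  have h1 : M.getD f [] = M[f]'hf := by
    rw [List.getD_eq_getElem?_getD, List.getElem?_eq_getElem hf]; rfl
  rw [h1, List.getD_eq_getElem?_getD, List.getElem?_eq_getElem hc]; rfl

lemma pv_cell_eq (M : List (List Int))
    (hvals : ∀ row ∈ M, ∀ x ∈ row.take (M.headD []).length, x = 0 ∨ x = 1 ∨ x = 2)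
    (hge : ∀ row ∈ M, (M.headD []).length ≤ row.length)
    (f c : Nat) (hf : f < M.length) (hc : c < (M.headD []).length) :
    nuevoEstado M (f : Int) (c : Int)
      = bCell M (PySem.Dict.counter (bHits M)) (f : Int) (c : Int) := by
  have hrowlen : (M.headD []).length ≤ (M[f]'hf).length :=
    hge _ (List.getElem_mem hf)
  have hc' : c < (M[f]'hf).length := by omega
  have hcell := pv_cellAt_getElem M f c hf hc'
  have hctake : c < ((M[f]'hf).take (M.headD []).length).length := by
    simp only [List.length_take]; omega
  have htake : ((M[f]'hf).take (M.headD []).length)[c]'hctake = (M[f]'hf)[c]'hc' := by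
    simp [List.getElem_take]
  have hx : (M[f]'hf)[c]'hc' = 0 ∨ (M[f]'hf)[c]'hc' = 1 ∨ (M[f]'hf)[c]'hc' = 2 := by
    rw [← htake]
    exact hvals _ (List.getElem_mem hf) _ (List.getElem_mem hctake)
  unfold nuevoEstado bCell
  rw [PySem.Dict.getD_counter, pv_count_eq M f c hf hc]
  rcases hx with h | h | h <;> rw [hcell] <;> rw [h] <;> norm_num
  omega

-- ===== VERDICT (by name: the statement is the Claim_ definition above) =====
theorem nuevaGeneracion_spec : Claim_equal_nuevaGeneracion := by
  intro M _ hpre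
  obtain ⟨_, hge, hvals⟩ := hpre
  unfold Spec_nuevaGeneracion
  rw [pv_A_norm M hge, pv_alt_norm M hge]
  apply List.map_congr_left
  intro f hf
  congr 1
  apply List.map_congr_left
  intro c hc
  exact pv_cell_eq M hvals hge f c (List.mem_range.mp hf) (List.mem_range.mp hc)
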